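-- pv_equiv track=rewrite | github.com/ChairmanFMao/codeforces | contests/Round-835-div.4/e.py | calc
-- ===== SOURCE A (Python) =====
-- sz = len
--
-- def calc(v):
--     out = 0; zero = 0
--     for i in range(sz(v)-1,-1,-1):
--         if not v[i]:
--             zero += 1
--         else:
--             out += zero
--     return out
-- ===== SOURCE B (Python) =====
-- def calc(v):
--     # divide and conquer: cross pairs = ones in left half * zeros in right half
--     if len(v) <= 1:
--         return 0
--     m = len(v) // 2
--     left, right = v[:m], v[m:]
--     ones = sum(1 for x in left if x)
--     zeros = sum(1 for x in right if not x)
--     return calc(left) + calc(right) + ones * zeros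
-- ===== Notes on version B (the rewrite author's own statement) =====
-- stated objective: alternative
-- what changed: Replaces A's single backward accumulator loop with a recursive divide-and-conquer (inversion-count style): split the list in half, recurse on both halves, and add ones(left)*zeros(right) for the cross pairs.
import Mathlib
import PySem

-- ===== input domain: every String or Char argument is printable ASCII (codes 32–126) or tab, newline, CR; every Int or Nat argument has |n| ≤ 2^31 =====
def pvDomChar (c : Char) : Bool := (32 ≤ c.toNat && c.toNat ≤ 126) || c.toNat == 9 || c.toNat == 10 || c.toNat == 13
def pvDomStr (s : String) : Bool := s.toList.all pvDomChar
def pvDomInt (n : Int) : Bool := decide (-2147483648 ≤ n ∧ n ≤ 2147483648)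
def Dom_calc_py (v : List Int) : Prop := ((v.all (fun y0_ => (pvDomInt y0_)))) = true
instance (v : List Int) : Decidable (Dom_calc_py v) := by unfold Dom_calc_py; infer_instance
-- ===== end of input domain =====

-- B counts (one, later zero) pairs by divide-and-conquer (recurse on the two halves and add
-- ones(left)*zeros(right)); A uses one backward accumulator loop — same total, different algorithm.

-- ===== PORT A =====
-- backward index loop; pyGetD is exact here since every i ∈ range(len-1,-1,-1) is in range
def calc_py (v : List Int) : Int :=
  (PySem.List.pyRange ((v.length : Int) - 1) (-1) (-1)).foldl
    (fun (st : Int × Int) i =>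
      let x := PySem.List.pyGetD v i 0
      if x == 0 then (st.1, st.2 + 1) else (st.1 + st.2, st.2))
    (0, 0) |>.1

-- ===== PORT B =====
-- sum(1 for x in left if x)
def calcOnes (l : List Int) : Int :=
  l.foldl (fun a x => if x ≠ 0 then a + 1 else a) 0
-- sum(1 for x in right if not x)
def calcZeros (l : List Int) : Int :=
  l.foldl (fun a x => if x = 0 then a + 1 else a) 0

def calc_py_alt (v : List Int) : Int :=
  if h : v.length ≤ 1 then 0
  else
    let m := v.length / 2
    calc_py_alt (v.take m) + calc_py_alt (v.drop m)
      + calcOnes (v.take m) * calcZeros (v.drop m)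
termination_by v.length
decreasing_by
  · simp only [List.length_take]; omega
  · simp only [List.length_drop]; omega

-- ===== PRECONDITION & SPEC =====
def Spec_calc_py (v : List Int) (out : Int) : Prop := out = calc_py_alt v
instance (v : List Int) (out : Int) : Decidable (Spec_calc_py v out) := by unfold Spec_calc_py; infer_instance

-- ===== CLAIM (what is proved, stated in full; the proofs are below) =====
def Claim_equal_calc_py : Prop := ∀ (v : List Int), Dom_calc_py v → Spec_calc_py v (calc_py v)

-- ===== LEMMAS AND PROOFS =====

-- Z v = number of zeros; T v = number of nonzeros; P v = number of (one, later zero) pairs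
def pvZ : List Int → Int
  | [] => 0
  | x :: t => (if x = 0 then 1 else 0) + pvZ t

def pvT : List Int → Int
  | [] => 0
  | x :: t => (if x = 0 then 0 else 1) + pvT t

def pvP : List Int → Int
  | [] => 0
  | x :: t => (if x = 0 then 0 else pvZ t) + pvP t

theorem calc_py_eq_foldr (v : List Int) :
    calc_py v = (v.foldr
      (fun x (st : Int × Int) =>
        if x == 0 then (st.1, st.2 + 1) else (st.1 + st.2, st.2)) (0, 0)).1 := by
  unfold calc_py
  rw [show ((v.length : Int) - 1) = ((-1 : Int) + (v.length : Int)) by ring]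
  rw [show PySem.List.pyRange (-1 + (v.length : Int)) (-1) (-1)
        = (PySem.List.pyRange 0 (v.length : Int) 1).reverse by
      rw [PySem.List.pyRange_neg_one_eq_reverse]; norm_num]
  rw [List.foldl_reverse]
  have hmap : ∀ (l : List Int) (st : Int × Int),
      l.foldr (fun i (st : Int × Int) =>
        let x := PySem.List.pyGetD v i 0
        if x == 0 then (st.1, st.2 + 1) else (st.1 + st.2, st.2)) st
      = (l.map (fun i => PySem.List.pyGetD v i 0)).foldr
        (fun x (st : Int × Int) =>
          if x == 0 then (st.1, st.2 + 1) else (st.1 + st.2, st.2)) st := by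
    intro l st
    induction l with
    | nil => rfl
    | cons a t ih => simp only [List.map, List.foldr]; rw [ih]
  rw [hmap, PySem.List.map_pyGetD_pyRange_zero']

theorem foldrA_eq (v : List Int) :
    v.foldr (fun x (st : Int × Int) =>
      if x == 0 then (st.1, st.2 + 1) else (st.1 + st.2, st.2)) (0, 0)
    = (pvP v, pvZ v) := by
  induction v with
  | nil => rfl
  | cons x t ih =>
    simp only [List.foldr, ih, pvP, pvZ]
    by_cases h : x = 0 <;> simp [h] <;> ring

theorem calcOnes_eq (l : List Int) : calcOnes l = pvT l := by
  have key : ∀ (l : List Int) (a : Int),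
      l.foldl (fun a x => if x ≠ 0 then a + 1 else a) a = a + pvT l := by
    intro l
    induction l with
    | nil => intro a; simp [pvT]
    | cons x t ih =>
      intro a
      simp only [List.foldl, pvT]
      by_cases h : x = 0
      · rw [if_neg (by simp [h]), if_pos h, ih]; ring
      · rw [if_pos h, if_neg h, ih]; ring
  simpa [calcOnes] using key l 0

theorem calcZeros_eq (l : List Int) : calcZeros l = pvZ l := by
  have key : ∀ (l : List Int) (a : Int),
      l.foldl (fun a x => if x = 0 then a + 1 else a) a = a + pvZ l := by
    intro l
    induction l with
    | nil => intro a; simp [pvZ]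
    | cons x t ih =>
      intro a
      simp only [List.foldl, pvZ]
      by_cases h : x = 0 <;> simp [h, ih] <;> ring
  simpa [calcZeros] using key l 0

theorem pvZ_append (l r : List Int) : pvZ (l ++ r) = pvZ l + pvZ r := by
  induction l with
  | nil => simp [pvZ]
  | cons x t ih => simp only [List.cons_append, pvZ, ih]; ring

theorem pvP_append (l r : List Int) :
    pvP (l ++ r) = pvP l + pvP r + pvT l * pvZ r := by
  induction l with
  | nil => simp [pvP, pvT]
  | cons x t ih =>
    simp only [List.cons_append, pvP, pvT, ih, pvZ_append]
    by_cases h : x = 0 <;> simp [h] <;> ring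

theorem pvP_short (v : List Int) (h : v.length ≤ 1) : pvP v = 0 := by
  match v with
  | [] => rfl
  | [x] => simp [pvP, pvZ]
  | _ :: _ :: _ => simp at h

theorem calc_py_alt_eq_pvP (v : List Int) : calc_py_alt v = pvP v := by
  induction v using calc_py_alt.induct with
  | case1 v h => rw [calc_py_alt, dif_pos h, pvP_short v h]
  | case2 v h m ih1 ih2 =>
    simp only [show m = v.length / 2 from rfl] at ih1 ih2
    rw [calc_py_alt, dif_neg h]
    simp only [ih1, ih2, calcOnes_eq, calcZeros_eq]
    conv_rhs => rw [← List.take_append_drop (v.length / 2) v]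
    rw [pvP_append]

-- ===== VERDICT (by name: the statement is the Claim_ definition above) =====
theorem calc_py_spec : Claim_equal_calc_py := by
  intro v _
  unfold Spec_calc_py
  rw [calc_py_eq_foldr, foldrA_eq, calc_py_alt_eq_pvP]
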